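-- pv_equiv track=rewrite | github.com/PrashilRupapara/route_analyzer | main.py | makeComfortable
-- ===== SOURCE A (Python) =====
-- def makeComfortable(stationName):
--     def removeExtraSpace(strings):
--         """It will remove multiple spaces and tab
--             remove brts, brt"""
--         space = strings.split(' ')
--
--         for i in range(space.count("")):
--             space.remove("")
--         #for ele in space:
-- #    	    if ele.endswith("brts")
--
--         xspace = []
--         for ele in space:
--             if ele.count("\t")>0:
--                 filter = ele.split("\t")
--                 for i in range(filter.count("")):
--                     filter.remove("")
--                 ele = ''.join(filter)
--             xspace.append(ele)
--         return ''.join(xspace)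
--
--     stationName = stationName.lower()
--     removeList = ["brts", "brt", "'", "`", "‘", "’", "junction"]
--     for ele in removeList:
--         stationName = stationName.replace(ele,"")
--     # TODO: remove vowel form the station
--     replaceDict = {"z":"s", "e":"a", "i":"y"}
--     for ele in replaceDict:
--         stationName = stationName.replace(ele, replaceDict[ele])
--     stationName = removeExtraSpace(stationName)
--     return stationName
-- ===== SOURCE B (Python) =====
-- def makeComfortable(stationName):
--     stationName = stationName.lower()
--     for ele in ["brts", "brt", "'", "`", "\u2018", "\u2019", "junction"]:
--         stationName = stationName.replace(ele, "")
--     # one translate pass: substitute z->s, e->a, i->y and delete every space and tab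
--     return stationName.translate(str.maketrans({"z": "s", "e": "a", "i": "y", " ": None, "\t": None}))
-- ===== Notes on version B (the rewrite author's own statement) =====
-- stated objective: idiomatic
-- what changed: The per-key replaceDict loop and the whole split/remove/join removeExtraSpace helper are replaced by a single str.translate pass that substitutes z->s, e->a, i->y and deletes every space and tab in one character-level traversal.
import Mathlib
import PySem

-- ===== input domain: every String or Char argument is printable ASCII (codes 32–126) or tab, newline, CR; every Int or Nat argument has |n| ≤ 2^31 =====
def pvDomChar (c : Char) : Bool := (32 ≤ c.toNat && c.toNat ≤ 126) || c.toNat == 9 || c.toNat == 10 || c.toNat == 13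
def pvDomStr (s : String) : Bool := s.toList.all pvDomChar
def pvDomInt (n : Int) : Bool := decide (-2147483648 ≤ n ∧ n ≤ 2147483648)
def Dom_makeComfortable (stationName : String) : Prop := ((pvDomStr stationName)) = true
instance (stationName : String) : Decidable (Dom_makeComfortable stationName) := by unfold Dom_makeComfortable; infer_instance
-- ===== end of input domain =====

-- B replaces A's replaceDict loop and its removeExtraSpace helper by one translate pass
-- (substitute z→s, e→a, i→y and delete every space and tab in a single traversal); idiomatic/simpler.

-- ===== PORT A =====
-- inner helper removeExtraSpace of A, ported literally: split on ' ', remove "" count("") times,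
-- per token split on '\t' and remove "" likewise, join with ''.
-- split? with the nonempty separators " "/"\t" is always some (getD [] is never taken), and
-- remove? is only invoked count-many times so the element is present (getD l is never taken).
def removeExtraSpaceA (strings : String) : String :=
  let space := (PySem.Str.split? strings " ").getD []
  let space := (PySem.List.pyRange 0 ((PySem.List.count space "" : Nat) : Int) 1).foldl
      (fun l _ => ((PySem.List.remove? l "").getD l)) space
  let xspace := space.foldl (fun xs ele =>
      let ele := if (PySem.Str.count ele "\t") > 0 then
          let filter := (PySem.Str.split? ele "\t").getD []
          let filter := (PySem.List.pyRange 0 ((PySem.List.count filter "" : Nat) : Int) 1).foldl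
              (fun l _ => ((PySem.List.remove? l "").getD l)) filter
          PySem.Str.join "" filter
        else ele
      xs ++ [ele]) []
  PySem.Str.join "" xspace

def makeComfortable (stationName : String) : String :=
  let s := PySem.Str.lower stationName
  let s := (["brts", "brt", "'", "`", "‘", "’", "junction"]).foldl
      (fun s ele => PySem.Str.replace s ele "") s
  let replaceDict : PySem.Dict String String :=
      ((PySem.Dict.empty.insert "z" "s").insert "e" "a").insert "i" "y"
  let s := replaceDict.keys.foldl (fun s ele => PySem.Str.replace s ele (replaceDict.getD ele "")) s
  removeExtraSpaceA s

-- ===== PORT B =====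
-- str.maketrans({"z":"s","e":"a","i":"y"," ":None,"\t":None}) applied per character by translate
def pyTranslate (c : Char) : Option Char :=
  if c = ' ' ∨ c = '\t' then none
  else some (if c = 'z' then 's' else if c = 'e' then 'a' else if c = 'i' then 'y' else c)

def makeComfortable_alt (stationName : String) : String :=
  let s := PySem.Str.lower stationName
  let s := (["brts", "brt", "'", "`", "‘", "’", "junction"]).foldl
      (fun s ele => PySem.Str.replace s ele "") s
  String.ofList (s.toList.filterMap pyTranslate)

-- ===== PRECONDITION & SPEC =====
def Spec_makeComfortable (stationName : String) (out : String) : Prop := out = makeComfortable_alt stationName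
instance (stationName : String) (out : String) : Decidable (Spec_makeComfortable stationName out) := by unfold Spec_makeComfortable; infer_instance

-- ===== CLAIM (what is proved, stated in full; the proofs are below) =====
def Claim_equal_makeComfortable : Prop := ∀ (stationName : String), Dom_makeComfortable stationName → Spec_makeComfortable stationName (makeComfortable stationName)

-- ===== LEMMAS AND PROOFS =====

-- single-character replace is a map
theorem replace_go_single (a b : Char) :
    ∀ (fuel : Nat) (l acc : List Char), l.length ≤ fuel →
      PySem.Chars.replace.go [a] [b] fuel l acc
        = acc.reverse ++ l.map (fun c => if c = a then b else c) := by
  intro fuel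
  induction fuel with
  | zero => intro l acc h; simp at h; subst h; simp [PySem.Chars.replace.go]
  | succ n ih =>
    intro l acc h
    cases l with
    | nil => simp [PySem.Chars.replace.go]
    | cons c t =>
      simp only [PySem.Chars.replace.go, List.isPrefixOf]
      by_cases hc : a = c
      · subst hc
        simp only [BEq.rfl, Bool.true_and, if_pos]
        rw [ih]
        · simp
        · simpa using Nat.le_of_succ_le_succ (by simpa using h)
      · have : (a == c) = false := by simpa using hc
        simp only [this, Bool.false_and, if_neg Bool.false_ne_true]
        rw [ih t (c :: acc) (by simpa using Nat.le_of_succ_le_succ (by simpa using h))]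
        simp [Ne.symm hc]

theorem replace_single (a b : Char) (cs : List Char) :
    PySem.Chars.replace cs [a] [b] = cs.map (fun c => if c = a then b else c) := by
  rw [PySem.Chars.replace]
  simp [replace_go_single a b cs.length cs [] (le_refl _)]

-- single-character substring count is element count
theorem count_go_single (a : Char) :
    ∀ (fuel : Nat) (l : List Char) (acc : Nat), l.length ≤ fuel →
      PySem.Chars.count.go [a] fuel l acc = acc + l.count a := by
  intro fuel
  induction fuel with
  | zero => intro l acc h; simp at h; subst h; simp [PySem.Chars.count.go]
  | succ n ih =>
    intro l acc h
    cases l with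
    | nil => simp [PySem.Chars.count.go]
    | cons c t =>
      simp only [PySem.Chars.count.go, List.isPrefixOf]
      by_cases hc : a = c
      · subst hc
        simp only [BEq.rfl, Bool.true_and, if_pos, List.length_cons, List.length_nil,
          Nat.zero_add, List.drop_succ_cons, List.drop_zero]
        rw [ih t (acc + 1) (by simpa using Nat.le_of_succ_le_succ (by simpa using h))]
        simp
        omega
      · have : (a == c) = false := by simpa using hc
        simp only [this, Bool.false_and, if_neg Bool.false_ne_true]
        rw [ih t acc (by simpa using Nat.le_of_succ_le_succ (by simpa using h))]
        simp [Ne.symm hc]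

theorem count_single (a : Char) (cs : List Char) :
    PySem.Chars.count cs [a] = cs.count a := by
  rw [PySem.Chars.count]
  simp [count_go_single a cs.length cs 0 (le_refl _)]

-- split on a single character, pure recursion
def glueSp (pre : List Char) : List (List Char) → List (List Char)
  | [] => [pre]
  | p :: ps => (pre ++ p) :: ps

def splSp (c : Char) : List Char → List (List Char)
  | [] => [[]]
  | x :: t => if x = c then [] :: splSp c t else glueSp [x] (splSp c t)

theorem glueSp_glueSp (pre x : List Char) (ps : List (List Char)) :
    glueSp pre (glueSp x ps) = glueSp (pre ++ x) ps := by
  cases ps <;> simp [glueSp]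

theorem splSp_ne_nil (c : Char) (l : List Char) : splSp c l ≠ [] := by
  cases l with
  | nil => simp [splSp]
  | cons x t =>
    simp only [splSp]
    split
    · simp
    · cases h : splSp c t <;> simp [glueSp]

theorem splitOn_go_single (c : Char) :
    ∀ (fuel : Nat) (l cur : List Char) (acc : List (List Char)), l.length ≤ fuel →
      PySem.Chars.splitOn.go [c] fuel l cur acc
        = acc.reverse ++ glueSp cur.reverse (splSp c l) := by
  intro fuel
  induction fuel with
  | zero => intro l cur acc h; simp at h; subst h; simp [PySem.Chars.splitOn.go, splSp, glueSp]
  | succ n ih =>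
    intro l cur acc h
    cases l with
    | nil => simp [PySem.Chars.splitOn.go, splSp, glueSp]
    | cons x t =>
      simp only [PySem.Chars.splitOn.go, List.isPrefixOf]
      by_cases hc : c = x
      · subst hc
        simp only [BEq.rfl, Bool.true_and, if_pos, List.length_cons, List.length_nil,
          Nat.zero_add, List.drop_succ_cons, List.drop_zero]
        rw [ih t [] (cur.reverse :: acc) (by simpa using Nat.le_of_succ_le_succ (by simpa using h))]
        cases hsp : splSp c t with
        | nil => exact absurd hsp (splSp_ne_nil c t)
        | cons p ps => simp [splSp, glueSp, hsp]
      · have : (c == x) = false := by simpa using hc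
        simp only [this, Bool.false_and, if_neg Bool.false_ne_true]
        rw [ih t (x :: cur) acc (by simpa using Nat.le_of_succ_le_succ (by simpa using h))]
        simp [splSp, Ne.symm hc, glueSp_glueSp]

theorem splitOn_single (c : Char) (cs : List Char) :
    PySem.Chars.splitOn cs [c] = splSp c cs := by
  rw [PySem.Chars.splitOn]
  rw [splitOn_go_single c (cs.length + 1) cs [] [] (by omega)]
  cases h : splSp c cs with
  | nil => exact absurd h (splSp_ne_nil c cs)
  | cons p ps => simp [glueSp]

theorem flatten_glueSp (x : List Char) (ps : List (List Char)) :
    (glueSp x ps).flatten = x ++ ps.flatten := by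
  cases ps <;> simp [glueSp]

theorem flatten_splSp (c : Char) (l : List Char) :
    (splSp c l).flatten = l.filter (fun x => !(x == c)) := by
  induction l with
  | nil => simp [splSp]
  | cons x t ih =>
    simp only [splSp]
    by_cases hc : x = c
    · subst hc; simp [ih]
    · simp [flatten_glueSp, hc, ih]

-- the "for i in range(xs.count(v)): xs.remove(v)" loop is a filter
theorem filter_erase_ne {α : Type} [BEq α] [LawfulBEq α] (v : α) (l : List α) :
    (l.erase v).filter (fun x => !(x == v)) = l.filter (fun x => !(x == v)) := by
  induction l with
  | nil => simp
  | cons x t ih =>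
    by_cases hx : x = v
    · subst hx; simp [List.erase_cons_head]
    · rw [List.erase_cons_tail (by simpa using hx)]
      simp [hx, ih]

theorem erase_iter {α : Type} [BEq α] [LawfulBEq α] (v : α) :
    ∀ (n : Nat) (P : List α), P.count v = n →
      (fun l => ((PySem.List.remove? l v).getD l))^[n] P = P.filter (fun x => !(x == v)) := by
  intro n
  induction n with
  | zero =>
    intro P h
    simp only [Function.iterate_zero, id_eq]
    refine (List.filter_eq_self.mpr fun x hx => ?_).symm
    have hxv : x ≠ v := by
      rintro rfl
      have := List.count_pos_iff.mpr hx
      omega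
    simpa using hxv
  | succ n ih =>
    intro P h
    have hv : v ∈ P := List.count_pos_iff.mp (by omega)
    rw [Function.iterate_succ_apply]
    simp only [PySem.List.remove?_eq_some_erase P v hv, Option.getD_some]
    rw [ih (P.erase v) (by rw [List.count_erase_self]; omega)]
    exact filter_erase_ne v P

theorem foldl_const_iterate {α β : Type} (f : α → α) :
    ∀ (r : List β) (x : α), r.foldl (fun a _ => f a) x = f^[r.length] x := by
  intro r
  induction r with
  | nil => intro x; simp
  | cons y t ih => intro x; simp [ih, Function.iterate_succ_apply]

theorem remove_loop {α : Type} [BEq α] [LawfulBEq α] (v : α) (P : List α) :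
    (PySem.List.pyRange 0 ((PySem.List.count P v : Nat) : Int) 1).foldl
        (fun l _ => ((PySem.List.remove? l v).getD l)) P
      = P.filter (fun x => !(x == v)) := by
  rw [foldl_const_iterate]
  rw [PySem.List.pyRange_zero_natCast, List.length_map, List.length_range]
  exact erase_iter v _ P (by rw [PySem.List.count_eq])

-- bridging small string literals
theorem toList_space : (" " : String).toList = [' '] := by decide
theorem toList_tab : ("\t" : String).toList = ['\t'] := by decide
theorem ofList_eq_empty_iff (p : List Char) : (String.ofList p = "") ↔ p = [] := by
  constructor
  · intro h
    have := congrArg String.toList h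
    simpa [String.toList_ofList] using this
  · rintro rfl; rfl

theorem flatten_intersperse_nil (L : List (List Char)) :
    (List.intersperse ([] : List Char) L).flatten = L.flatten := by
  induction L with
  | nil => simp
  | cons p ps ih =>
    cases ps with
    | nil => simp
    | cons q t => simp_all [List.intersperse]

theorem join_nil_flatten (L : List (List Char)) :
    PySem.Chars.join [] L = L.flatten := by
  simp [PySem.Chars.join, List.intercalate, flatten_intersperse_nil]

theorem flatten_filter_ne_nil (L : List (List Char)) :
    (L.filter (fun p => !(p == ([] : List Char)))).flatten = L.flatten := by
  induction L with
  | nil => simp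
  | cons p ps ih =>
    rw [List.filter_cons]
    by_cases hp : p = []
    · subst hp
      simpa using ih
    · have hb : (!(p == ([] : List Char))) = true := by simpa using hp
      rw [hb, if_pos rfl]
      simpa using ih

theorem join_empty_ofList (X : List (List Char)) :
    PySem.Str.join "" (X.map String.ofList) = String.ofList X.flatten := by
  simp only [PySem.Str.join]
  congr 1
  rw [show ("" : String).toList = [] from by decide, join_nil_flatten]
  simp [List.map_map, Function.comp_def, String.toList_ofList]

-- Str.split? on a single-char separator, through splSp
theorem split?_single (u : String) (c : Char) (sep : String) (hsep : sep.toList = [c]) :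
    (PySem.Str.split? u sep).getD [] = (splSp c u.toList).map String.ofList := by
  have h := PySem.Str.split?_map u sep
  rw [hsep] at h
  rw [PySem.Chars.split?] at h
  simp only [List.isEmpty_cons, if_neg Bool.false_ne_true] at h
  rw [splitOn_single] at h
  cases hs : PySem.Str.split? u sep with
  | none => rw [hs] at h; simp at h
  | some parts =>
    rw [hs] at h
    simp only [Option.map_some, Option.some.injEq] at h
    simp only [Option.getD_some]
    have : parts.map (fun s => String.ofList s.toList) = (splSp c u.toList).map String.ofList := by
      rw [← h, List.map_map]
      rfl
    simpa [String.ofList_toList] using this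

-- the inner tab-removal of a token
theorem token_eq (ele : String) :
    (if (PySem.Str.count ele "\t") > 0 then
        let filter := (PySem.Str.split? ele "\t").getD []
        let filter := (PySem.List.pyRange 0 ((PySem.List.count filter "" : Nat) : Int) 1).foldl
            (fun l _ => ((PySem.List.remove? l "").getD l)) filter
        PySem.Str.join "" filter
      else ele)
    = String.ofList (ele.toList.filter (fun x => !(x == '\t'))) := by
  by_cases h : (PySem.Str.count ele "\t") > 0
  · rw [if_pos h]
    simp only [split?_single ele '\t' "\t" toList_tab]
    rw [remove_loop]
    have hmapfilter :
        ((splSp '\t' ele.toList).map String.ofList).filter (fun x => !(x == ("" : String)))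
          = ((splSp '\t' ele.toList).filter (fun p => !(p == ([] : List Char)))).map String.ofList := by
      rw [List.filter_map]
      congr 1
      apply List.filter_congr
      intro p _
      by_cases hp : p = []
      · subst hp; rfl
      · have h1 : (String.ofList p == "") = false := by
          simpa using (fun hh => hp ((ofList_eq_empty_iff p).mp hh))
        have h2 : p.isEmpty = false := by simpa using hp
        simp [h1, h2]
    rw [hmapfilter, join_empty_ofList, flatten_filter_ne_nil, flatten_splSp]
  · rw [if_neg h]
    have hcount : ele.toList.count '\t' = 0 := by
      rw [PySem.Str.count_eq, toList_tab, count_single] at h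
      omega
    have : ele.toList.filter (fun x => !(x == '\t')) = ele.toList := by
      apply List.filter_eq_self.mpr
      intro x hx
      have hxv : x ≠ '\t' := by
        rintro rfl
        have := List.count_pos_iff.mpr hx
        omega
      simpa using hxv
    rw [this, String.ofList_toList]

-- A's removeExtraSpace deletes exactly the spaces and tabs
theorem removeExtra_eq (u : String) :
    removeExtraSpaceA u
      = String.ofList ((u.toList.filter (fun c => !(c == ' '))).filter (fun c => !(c == '\t'))) := by
  simp only [removeExtraSpaceA]
  rw [split?_single u ' ' " " toList_space]
  rw [remove_loop]
  have hmapfilter :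
      ((splSp ' ' u.toList).map String.ofList).filter (fun x => !(x == ("" : String)))
        = ((splSp ' ' u.toList).filter (fun p => !(p == ([] : List Char)))).map String.ofList := by
    rw [List.filter_map]
    congr 1
    apply List.filter_congr
    intro p _
    by_cases hp : p = []
    · subst hp; rfl
    · have h1 : (String.ofList p == "") = false := by
        simpa using (fun hh => hp ((ofList_eq_empty_iff p).mp hh))
      have h2 : p.isEmpty = false := by simpa using hp
      simp [h1, h2]
  rw [hmapfilter]
  rw [PySem.List.foldl_append_singleton_eq_map]
  rw [List.nil_append, List.map_map]
  have htok : (fun ele =>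
      (if (PySem.Str.count ele "\t") > 0 then
          let filter := (PySem.Str.split? ele "\t").getD []
          let filter := (PySem.List.pyRange 0 ((PySem.List.count filter "" : Nat) : Int) 1).foldl
              (fun l _ => ((PySem.List.remove? l "").getD l)) filter
          PySem.Str.join "" filter
        else ele)) ∘ String.ofList
      = (fun p : List Char => String.ofList (p.filter (fun x => !(x == '\t')))) := by
    funext p
    simp only [Function.comp_apply]
    rw [token_eq (String.ofList p), String.toList_ofList]
  rw [htok]
  rw [show (fun p : List Char => String.ofList (p.filter (fun x => !(x == '\t'))))
        = String.ofList ∘ (fun p : List Char => p.filter (fun x => !(x == '\t'))) from rfl,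
      ← List.map_map, join_empty_ofList, ← List.filter_flatten, flatten_filter_ne_nil,
      flatten_splSp]

-- the replaceDict loop of A, unfolded (a closed dict literal)
theorem dict_fold (t : String) :
    ((((PySem.Dict.empty.insert "z" "s").insert "e" "a").insert "i" "y")).keys.foldl
        (fun s ele => PySem.Str.replace s ele
          (((((PySem.Dict.empty.insert "z" "s").insert "e" "a").insert "i" "y")).getD ele "")) t
      = PySem.Str.replace (PySem.Str.replace (PySem.Str.replace t "z" "s") "e" "a") "i" "y" := by
  rfl

-- the three single-char replaces are one character map
def substZEI (c : Char) : Char := if c = 'z' then 's' else if c = 'e' then 'a' else if c = 'i' then 'y' else c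

theorem substZEI_comp (c : Char) :
    (if (if (if c = 'z' then 's' else c) = 'e' then 'a' else (if c = 'z' then 's' else c)) = 'i'
       then 'y'
       else (if (if c = 'z' then 's' else c) = 'e' then 'a' else (if c = 'z' then 's' else c)))
      = substZEI c := by
  by_cases hz : c = 'z'
  · subst hz; decide
  · by_cases he : c = 'e'
    · subst he; decide
    · by_cases hi : c = 'i'
      · subst hi; decide
      · simp [substZEI, hz, he, hi]

theorem replaces_toList (t : String) :
    (PySem.Str.replace (PySem.Str.replace (PySem.Str.replace t "z" "s") "e" "a") "i" "y").toList
      = t.toList.map substZEI := by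
  simp only [PySem.Str.toList_replace]
  rw [show ("z" : String).toList = ['z'] from by decide,
      show ("s" : String).toList = ['s'] from by decide,
      show ("e" : String).toList = ['e'] from by decide,
      show ("a" : String).toList = ['a'] from by decide,
      show ("i" : String).toList = ['i'] from by decide,
      show ("y" : String).toList = ['y'] from by decide]
  rw [replace_single, replace_single, replace_single, List.map_map, List.map_map]
  apply List.map_congr_left
  intro c _
  exact substZEI_comp c

-- substZEI never produces nor consumes a space or tab
theorem substZEI_space (c : Char) : (substZEI c == ' ') = (c == ' ') := by
  by_cases hz : c = 'z'
  · subst hz; decide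
  · by_cases he : c = 'e'
    · subst he; decide
    · by_cases hi : c = 'i'
      · subst hi; decide
      · simp [substZEI, hz, he, hi]

theorem substZEI_tab (c : Char) : (substZEI c == '\t') = (c == '\t') := by
  by_cases hz : c = 'z'
  · subst hz; decide
  · by_cases he : c = 'e'
    · subst he; decide
    · by_cases hi : c = 'i'
      · subst hi; decide
      · simp [substZEI, hz, he, hi]

-- B's translate pass, as filter-then-map
theorem filterMap_pyTranslate (l : List Char) :
    l.filterMap pyTranslate
      = ((l.filter (fun c => !(c == ' '))).filter (fun c => !(c == '\t'))).map substZEI := by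
  induction l with
  | nil => simp
  | cons c t ih =>
    rw [List.filterMap_cons]
    by_cases hs : c = ' '
    · subst hs
      rw [show pyTranslate ' ' = none from by decide]
      rw [List.filter_cons, show (!(' ' == ' ')) = false from by decide]
      simpa using ih
    · by_cases ht : c = '\t'
      · subst ht
        rw [show pyTranslate '\t' = none from by decide]
        rw [List.filter_cons, show (!('\t' == ' ')) = true from by decide, if_pos rfl]
        rw [List.filter_cons, show (!('\t' == '\t')) = false from by decide]
        simpa using ih
      · have hpt : pyTranslate c = some (substZEI c) := by
          simp [pyTranslate, hs, ht, substZEI]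
        rw [hpt]
        rw [List.filter_cons, show (!(c == ' ')) = true from by simpa using hs, if_pos rfl]
        rw [List.filter_cons, show (!(c == '\t')) = true from by simpa using ht, if_pos rfl]
        rw [List.map_cons, ih]

-- ===== VERDICT (by name: the statement is the Claim_ definition above) =====
theorem makeComfortable_spec : Claim_equal_makeComfortable := by
  intro s _
  unfold Spec_makeComfortable
  simp only [makeComfortable, makeComfortable_alt]
  rw [dict_fold, removeExtra_eq, replaces_toList, filterMap_pyTranslate]
  refine congrArg String.ofList ?_
  rw [List.filter_map, List.filter_map]
  have h1 : (fun c => !(c == ' ')) ∘ substZEI = (fun c => !(c == ' ')) := by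
    funext c; simp only [Function.comp_apply, substZEI_space]
  have h2 : (fun c => !(c == '\t')) ∘ substZEI = (fun c => !(c == '\t')) := by
    funext c; simp only [Function.comp_apply, substZEI_tab]
  rw [h1, h2]
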